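-- pv_equiv track=rewrite | github.com/koderAP/trust-gambit | scripts/trust-simulation.py | find_path_to_solver
-- ===== SOURCE A (Python) =====
-- from typing import Dict, List, Set, Tuple, Optional
--
-- def find_path_to_solver(user_id: str, delegation_graph: Dict[str, str],
--                        solvers: List[str]) -> Tuple[Optional[str], int]:
--     """
--     Find if user's delegation chain leads to a solver.
--     Returns (solver_id, distance) or (None, -1)
--     """
--     visited = set()
--     current = user_id
--     distance = 0
--
--     while current in delegation_graph:
--         next_user = delegation_graph[current]
--
--         if next_user in visited:
--             # Cycle detected
--             return (None, -1)
--
--         visited.add(current)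
--         current = next_user
--         distance += 1
--
--         if current in solvers:
--             return (current, distance)
--
--     # Check if current user is a solver
--     if current in solvers:
--         return (current, distance)
--
--     return (None, -1)
-- ===== SOURCE B (Python) =====
-- def find_path_to_solver(user_id, delegation_graph, solvers):
--     # Phase 1: collect the delegation path until a terminal node or a repeat.
--     chain = [user_id]
--     seen = set()
--     cur = user_id
--     while cur in delegation_graph:
--         nxt = delegation_graph[cur]
--         if nxt in seen:
--             break
--         seen.add(cur)
--         chain.append(nxt)
--         cur = nxt
--     # Phase 2: the first solver the delegation reaches; its index is its distance.
--     for i in range(1, len(chain)):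
--         if chain[i] in solvers:
--             return (chain[i], i)
--     # The start itself counts only when it delegates to nobody.
--     if len(chain) == 1 and user_id in solvers:
--         return (user_id, 0)
--     return (None, -1)
-- ===== Notes on version B (the rewrite author's own statement) =====
-- stated objective: alternative
-- what changed: A interleaves walking the delegation chain with cycle detection and solver checks in one loop with early returns; B first builds the whole delegation path as a list, then scans it once for the first solver, whose index is the distance, with a single terminal-start check at distance 0.
import Mathlib
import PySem

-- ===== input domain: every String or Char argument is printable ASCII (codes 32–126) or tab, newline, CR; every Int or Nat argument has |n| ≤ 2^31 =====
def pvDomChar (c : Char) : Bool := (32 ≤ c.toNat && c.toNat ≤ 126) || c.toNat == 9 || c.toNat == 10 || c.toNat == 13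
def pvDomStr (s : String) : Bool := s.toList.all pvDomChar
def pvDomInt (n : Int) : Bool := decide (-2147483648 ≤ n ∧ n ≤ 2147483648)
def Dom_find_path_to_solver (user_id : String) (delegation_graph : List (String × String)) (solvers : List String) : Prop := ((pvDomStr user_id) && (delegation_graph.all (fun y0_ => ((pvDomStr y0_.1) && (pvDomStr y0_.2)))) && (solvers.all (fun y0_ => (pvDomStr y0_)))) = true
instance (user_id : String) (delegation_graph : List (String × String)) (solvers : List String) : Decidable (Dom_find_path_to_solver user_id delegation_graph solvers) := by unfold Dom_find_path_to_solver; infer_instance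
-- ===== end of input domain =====

-- B replaces A's interleaved walk-and-test loop by a two-phase decomposition (build the
-- delegation chain, then scan it for the first solver); alternative shape, same cost.

-- ===== PORT A =====
-- A's while loop; fuel (graph length + 1) only makes the recursion total, the loop
-- never runs longer than that because each continuing iteration marks a fresh key visited.
def pvLoopA (g : PySem.Dict String String) (solvers : List String) :
    Nat → PySem.Set String → String → Int → Option String × Int
  | 0, _, _, _ => (none, -1)
  | fuel + 1, visited, current, distance =>
    match g.get? current with
    | none =>
      -- loop exit: check if current user is a solver
      if solvers.contains current then (some current, distance) else (none, -1)
    | some next_user =>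
      if PySem.Set.contains visited next_user then (none, -1)  -- cycle detected
      else
        let visited' := PySem.Set.add visited current
        let current' := next_user
        let distance' := distance + 1
        if solvers.contains current' then (some current', distance')
        else pvLoopA g solvers fuel visited' current' distance'

def find_path_to_solver (user_id : String) (delegation_graph : List (String × String)) (solvers : List String) : Option String × Int :=
  pvLoopA (PySem.Dict.mk delegation_graph) solvers (delegation_graph.length + 1) PySem.Set.empty user_id 0

-- ===== PORT B =====
-- Phase 1 of B: collect the delegation path until a terminal node or a repeat
-- (fuel as in A's port: a totality device only).
def pvChain (g : PySem.Dict String String) :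
    Nat → List String → PySem.Set String → String → List String
  | 0, chain, _, _ => chain
  | fuel + 1, chain, seen, cur =>
    match g.get? cur with
    | none => chain
    | some nxt =>
      if PySem.Set.contains seen nxt then chain
      else pvChain g fuel (chain ++ [nxt]) (PySem.Set.add seen cur) nxt

-- Phase 2 of B: the 'for i in range(1, len(chain))' scan, over chain[1:] with index i.
def pvScan (solvers : List String) : List String → Int → Option (String × Int)
  | [], _ => none
  | x :: xs, i => if solvers.contains x then some (x, i) else pvScan solvers xs (i + 1)

def find_path_to_solver_alt (user_id : String) (delegation_graph : List (String × String)) (solvers : List String) : Option String × Int :=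
  let chain := pvChain (PySem.Dict.mk delegation_graph) (delegation_graph.length + 1) [user_id] PySem.Set.empty user_id
  match pvScan solvers (chain.drop 1) 1 with
  | some (x, i) => (some x, i)
  | none =>
    if chain.length == 1 && solvers.contains user_id then (some user_id, 0)
    else (none, -1)

-- ===== PRECONDITION & SPEC =====
def Spec_find_path_to_solver (user_id : String) (delegation_graph : List (String × String)) (solvers : List String) (out : Option String × Int) : Prop := out = find_path_to_solver_alt user_id delegation_graph solvers
instance (user_id : String) (delegation_graph : List (String × String)) (solvers : List String) (out : Option String × Int) : Decidable (Spec_find_path_to_solver user_id delegation_graph solvers out) := by unfold Spec_find_path_to_solver; infer_instance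

-- ===== CLAIM (what is proved, stated in full; the proofs are below) =====
def Claim_equal_find_path_to_solver : Prop := ∀ (user_id : String) (delegation_graph : List (String × String)) (solvers : List String), Dom_find_path_to_solver user_id delegation_graph solvers → Spec_find_path_to_solver user_id delegation_graph solvers (find_path_to_solver user_id delegation_graph solvers)

-- ===== LEMMAS AND PROOFS =====

-- unfolding equations and branch-level equations for the two fueled loops
lemma pvLoopA_zero (g : PySem.Dict String String) (solvers : List String)
    (visited : PySem.Set String) (current : String) (distance : Int) :
    pvLoopA g solvers 0 visited current distance = (none, -1) := rfl

lemma pvLoopA_succ (g : PySem.Dict String String) (solvers : List String) (f : Nat)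
    (visited : PySem.Set String) (current : String) (distance : Int) :
    pvLoopA g solvers (f + 1) visited current distance =
      match g.get? current with
      | none => if solvers.contains current then (some current, distance) else (none, -1)
      | some next_user =>
        if PySem.Set.contains visited next_user then (none, -1)
        else if solvers.contains next_user then (some next_user, distance + 1)
        else pvLoopA g solvers f (PySem.Set.add visited current) next_user (distance + 1) := rfl

lemma pvLoopA_succ_none (g : PySem.Dict String String) (solvers : List String) (f : Nat)
    (visited : PySem.Set String) (current : String) (distance : Int)
    (hg : g.get? current = none) :
    pvLoopA g solvers (f + 1) visited current distance =
      if solvers.contains current then (some current, distance) else (none, -1) := by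
  rw [pvLoopA_succ, hg]

lemma pvLoopA_succ_cycle (g : PySem.Dict String String) (solvers : List String) (f : Nat)
    (visited : PySem.Set String) (current nxt : String) (distance : Int)
    (hg : g.get? current = some nxt) (hc : PySem.Set.contains visited nxt = true) :
    pvLoopA g solvers (f + 1) visited current distance = (none, -1) := by
  rw [pvLoopA_succ, hg]
  show (if PySem.Set.contains visited nxt = true then ((none : Option String), (-1 : Int))
        else if solvers.contains nxt = true then (some nxt, distance + 1)
        else pvLoopA g solvers f (PySem.Set.add visited current) nxt (distance + 1)) = _
  rw [if_pos hc]

lemma pvLoopA_succ_solver (g : PySem.Dict String String) (solvers : List String) (f : Nat)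
    (visited : PySem.Set String) (current nxt : String) (distance : Int)
    (hg : g.get? current = some nxt) (hc : PySem.Set.contains visited nxt = false)
    (hs : solvers.contains nxt = true) :
    pvLoopA g solvers (f + 1) visited current distance = (some nxt, distance + 1) := by
  rw [pvLoopA_succ, hg]
  show (if PySem.Set.contains visited nxt = true then ((none : Option String), (-1 : Int))
        else if solvers.contains nxt = true then (some nxt, distance + 1)
        else pvLoopA g solvers f (PySem.Set.add visited current) nxt (distance + 1)) = _
  rw [if_neg (by simp only [hc]; simp), if_pos hs]

lemma pvLoopA_succ_step (g : PySem.Dict String String) (solvers : List String) (f : Nat)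
    (visited : PySem.Set String) (current nxt : String) (distance : Int)
    (hg : g.get? current = some nxt) (hc : PySem.Set.contains visited nxt = false)
    (hs : solvers.contains nxt = false) :
    pvLoopA g solvers (f + 1) visited current distance =
      pvLoopA g solvers f (PySem.Set.add visited current) nxt (distance + 1) := by
  rw [pvLoopA_succ, hg]
  show (if PySem.Set.contains visited nxt = true then ((none : Option String), (-1 : Int))
        else if solvers.contains nxt = true then (some nxt, distance + 1)
        else pvLoopA g solvers f (PySem.Set.add visited current) nxt (distance + 1)) = _
  rw [if_neg (by simp only [hc]; simp), if_neg (by simp only [hs]; simp)]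

lemma pvChain_zero (g : PySem.Dict String String) (chain : List String)
    (seen : PySem.Set String) (cur : String) :
    pvChain g 0 chain seen cur = chain := rfl

lemma pvChain_succ (g : PySem.Dict String String) (f : Nat) (chain : List String)
    (seen : PySem.Set String) (cur : String) :
    pvChain g (f + 1) chain seen cur =
      match g.get? cur with
      | none => chain
      | some nxt =>
        if PySem.Set.contains seen nxt then chain
        else pvChain g f (chain ++ [nxt]) (PySem.Set.add seen cur) nxt := rfl

lemma pvChain_succ_none (g : PySem.Dict String String) (f : Nat) (chain : List String)
    (seen : PySem.Set String) (cur : String) (hg : g.get? cur = none) :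
    pvChain g (f + 1) chain seen cur = chain := by
  rw [pvChain_succ, hg]

lemma pvChain_succ_cycle (g : PySem.Dict String String) (f : Nat) (chain : List String)
    (seen : PySem.Set String) (cur nxt : String)
    (hg : g.get? cur = some nxt) (hc : PySem.Set.contains seen nxt = true) :
    pvChain g (f + 1) chain seen cur = chain := by
  rw [pvChain_succ, hg]
  show (if PySem.Set.contains seen nxt = true then chain
        else pvChain g f (chain ++ [nxt]) (PySem.Set.add seen cur) nxt) = chain
  rw [if_pos hc]

lemma pvChain_succ_step (g : PySem.Dict String String) (f : Nat) (chain : List String)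
    (seen : PySem.Set String) (cur nxt : String)
    (hg : g.get? cur = some nxt) (hc : PySem.Set.contains seen nxt = false) :
    pvChain g (f + 1) chain seen cur =
      pvChain g f (chain ++ [nxt]) (PySem.Set.add seen cur) nxt := by
  rw [pvChain_succ, hg]
  show (if PySem.Set.contains seen nxt = true then chain
        else pvChain g f (chain ++ [nxt]) (PySem.Set.add seen cur) nxt) = _
  rw [if_neg (by simp only [hc]; simp)]

-- pvChain only extends its accumulator.
lemma pvChain_extends (g : PySem.Dict String String) :
    ∀ (fuel : Nat) (chain : List String) (seen : PySem.Set String) (cur : String),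
    ∃ suf, pvChain g fuel chain seen cur = chain ++ suf := by
  intro fuel
  induction fuel with
  | zero => intro chain seen cur; exact ⟨[], by simp [pvChain_zero]⟩
  | succ f ih =>
    intro chain seen cur
    cases hg : g.get? cur with
    | none => exact ⟨[], by simp [pvChain_succ_none g f chain seen cur hg]⟩
    | some nxt =>
      cases hc : PySem.Set.contains seen nxt with
      | true => exact ⟨[], by simp [pvChain_succ_cycle g f chain seen cur nxt hg hc]⟩
      | false =>
        obtain ⟨suf, hsuf⟩ := ih (chain ++ [nxt]) (PySem.Set.add seen cur) nxt
        refine ⟨nxt :: suf, ?_⟩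
        rw [pvChain_succ_step g f chain seen cur nxt hg hc, hsuf]
        simp

-- pvScan skips a solver-free prefix …
lemma pvScan_none (solvers : List String) :
    ∀ (t : List String) (i : Int), (∀ x ∈ t, x ∉ solvers) →
    pvScan solvers t i = none := by
  intro t
  induction t with
  | nil => intro i _; rfl
  | cons x xs ih =>
    intro i h
    have hx : x ∉ solvers := h x (by simp)
    simp only [pvScan]
    rw [if_neg (by simpa using hx)]
    exact ih (i + 1) (fun y hy => h y (by simp [hy]))

-- … and returns the first solver with its index.
lemma pvScan_finds (solvers : List String) :
    ∀ (t : List String) (nxt : String) (rest : List String) (i : Int),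
    (∀ x ∈ t, x ∉ solvers) → nxt ∈ solvers →
    pvScan solvers (t ++ nxt :: rest) i = some (nxt, i + t.length) := by
  intro t
  induction t with
  | nil =>
    intro nxt rest i _ hn
    simp only [List.nil_append, pvScan]
    rw [if_pos (by simpa using hn)]
    simp
  | cons x xs ih =>
    intro nxt rest i h hn
    have hx : x ∉ solvers := h x (by simp)
    simp only [List.cons_append, pvScan]
    rw [if_neg (by simpa using hx)]
    rw [ih nxt rest (i + 1) (fun y hy => h y (by simp [hy])) hn]
    simp; ring

lemma getLast?_mem_drop_one {l : List String} {c : String}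
    (h : l.getLast? = some c) (h2 : l.drop 1 ≠ []) : c ∈ l.drop 1 := by
  match l, h2 with
  | a :: b :: t, _ =>
    simp only [List.drop_one, List.tail_cons]
    have : (b :: t).getLast? = some c := by
      rw [← h]; simp [List.getLast?_cons_cons]
    exact List.mem_of_getLast? this

-- Main bridge: A's loop from a mid-loop state equals B's build-then-scan on the chain so far.
lemma pvLoop_eq_chain (g : PySem.Dict String String) (solvers : List String) (u : String) :
    ∀ (fuel : Nat) (chain : List String) (seen : PySem.Set String) (cur : String),
    chain.head? = some u →
    chain.getLast? = some cur →
    (∀ x ∈ chain.drop 1, x ∉ solvers) →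
    (chain.drop 1 = [] → fuel ≠ 0) →
    (chain.drop 1 = [] → ∀ x, PySem.Set.contains seen x = false) →
    pvLoopA g solvers fuel seen cur ((chain.length : Int) - 1) =
      (match pvScan solvers ((pvChain g fuel chain seen cur).drop 1) 1 with
       | some (x, i) => (some x, i)
       | none =>
         if (pvChain g fuel chain seen cur).length == 1 && solvers.contains u then (some u, 0)
         else (none, -1)) := by
  intro fuel
  induction fuel with
  | zero =>
    intro chain seen cur hhead hlast hfree hfuel _
    have hne : chain.drop 1 ≠ [] := fun h => (hfuel h) rfl
    have hlen : 2 ≤ chain.length := by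
      rcases chain with _ | ⟨a, _ | ⟨b, t⟩⟩ <;> simp_all
    rw [pvLoopA_zero, pvChain_zero, pvScan_none solvers _ 1 hfree]
    rw [if_neg (by intro hx; simp at hx; omega)]
  | succ f ih =>
    intro chain seen cur hhead hlast hfree hfuel hseen
    have hchne : chain ≠ [] := by rintro rfl; simp at hhead
    cases hg : g.get? cur with
    | none =>
      rw [pvLoopA_succ_none g solvers f seen cur _ hg,
          pvChain_succ_none g f chain seen cur hg,
          pvScan_none solvers _ 1 hfree]
      by_cases hd : chain.drop 1 = []
      · -- chain = [u], cur = u: the start is terminal, distance-0 check on both sides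
        have hcu : chain = [u] := by
          rcases chain with _ | ⟨a, t⟩
          · exact absurd rfl hchne
          · rcases t with _ | ⟨b, t⟩
            · simp at hhead; rw [hhead]
            · simp at hd
        have hcur : cur = u := by
          rw [hcu] at hlast; simp at hlast; exact hlast.symm
        rw [hcu, hcur]
        cases hs : solvers.contains u with
        | true => simp
        | false => simp
      · -- cur is a mid-chain node, already known not to be a solver
        have hcurfree : cur ∉ solvers := hfree cur (getLast?_mem_drop_one hlast hd)
        have hlen : 2 ≤ chain.length := by
          rcases chain with _ | ⟨a, _ | ⟨b, t⟩⟩ <;> simp_all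
        rw [if_neg (by simpa using hcurfree),
            if_neg (by intro hx; simp at hx; omega)]
    | some nxt =>
      cases hc : PySem.Set.contains seen nxt with
      | true =>
        -- cycle: A returns (None, -1); B stops building, the scan finds nothing
        rw [pvLoopA_succ_cycle g solvers f seen cur nxt _ hg hc,
            pvChain_succ_cycle g f chain seen cur nxt hg hc,
            pvScan_none solvers _ 1 hfree]
        by_cases hd : chain.drop 1 = []
        · exact absurd hc (by simp only [hseen hd nxt]; simp)
        · have hlen : 2 ≤ chain.length := by
            rcases chain with _ | ⟨a, _ | ⟨b, t⟩⟩ <;> simp_all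
          rw [if_neg (by intro hx; simp at hx; omega)]
      | false =>
        cases hs : solvers.contains nxt with
        | true =>
          -- A returns (nxt, distance+1); B's scan finds nxt first, at index = chain.length
          rw [pvLoopA_succ_solver g solvers f seen cur nxt _ hg hc hs,
              pvChain_succ_step g f chain seen cur nxt hg hc]
          obtain ⟨suf, hsuf⟩ := pvChain_extends g f (chain ++ [nxt]) (PySem.Set.add seen cur) nxt
          rw [hsuf]
          rcases chain with _ | ⟨a, t⟩
          · exact absurd rfl hchne
          · have hdr : (((a :: t) ++ [nxt]) ++ suf).drop 1 = t ++ nxt :: suf := by simp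
            rw [hdr, pvScan_finds solvers t nxt suf 1
              (fun y hy => hfree y (by simpa using hy)) (by simpa using hs)]
            show (some nxt, (((a :: t).length : Int) - 1) + 1) = (some nxt, 1 + (t.length : Int))
            have harith : (((a :: t).length : Int) - 1) + 1 = 1 + (t.length : Int) := by
              simp only [List.length_cons]
              omega
            rw [harith]
        | false =>
          -- neither returns: step both sides and use the induction hypothesis
          rw [pvLoopA_succ_step g solvers f seen cur nxt _ hg hc hs,
              pvChain_succ_step g f chain seen cur nxt hg hc]
          have hrec := ih (chain ++ [nxt]) (PySem.Set.add seen cur) nxt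
            (by rcases chain with _ | ⟨a, t⟩
                · exact absurd rfl hchne
                · simpa using hhead)
            (by simp)
            (by intro x hx
                rcases chain with _ | ⟨a, t⟩
                · exact absurd rfl hchne
                · simp at hx
                  rcases hx with hx | hx
                  · exact hfree x (by simpa using hx)
                  · subst hx; simpa using hs)
            (by intro h
                exact absurd h (by rcases chain with _ | ⟨a, t⟩ <;> simp_all))
            (by intro h
                exact absurd h (by rcases chain with _ | ⟨a, t⟩ <;> simp_all))
          have hlen : ((chain ++ [nxt]).length : Int) - 1 = (chain.length : Int) - 1 + 1 := by
            simp
          rw [hlen] at hrec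
          exact hrec

-- ===== VERDICT (by name: the statement is the Claim_ definition above) =====
theorem find_path_to_solver_spec : Claim_equal_find_path_to_solver := by
  intro user_id delegation_graph solvers _
  unfold Spec_find_path_to_solver find_path_to_solver find_path_to_solver_alt
  have h := pvLoop_eq_chain (PySem.Dict.mk delegation_graph) solvers user_id
    (delegation_graph.length + 1) [user_id] PySem.Set.empty user_id
    (by simp) (by simp) (by simp) (by simp) (by intro _ x; rfl)
  simpa using h
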